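-- pv_equiv track=rewrite | github.com/NuryeNigusMekonen/BrownfieldCartographer | src/agents/semanticist.py | _execution_priority
-- ===== SOURCE A (Python) =====
-- def _execution_priority(lowered_path: str) -> int:
--     strong_markers = (
--         "cli",
--         "main.py",
--         "pipeline",
--         "orchestr",
--         "job",
--         "worker",
--         "runner",
--         "invoke",
--         "entrypoint",
--     )
--     medium_markers = (
--         "plugin",
--         "dagster",
--         "airflow",
--         "executor",
--     )
--     if any(marker in lowered_path for marker in strong_markers):
--         return 2
--     if any(marker in lowered_path for marker in medium_markers):
--         return 1
--     return 0
-- ===== SOURCE B (Python) =====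
-- # B: position-major scan -- walk the path once, testing markers as prefixes at
-- # each position via startswith(marker, i); never uses the `in` substring operator.
-- _MARKERS = (
--     ("cli", 2),
--     ("main.py", 2),
--     ("pipeline", 2),
--     ("orchestr", 2),
--     ("job", 2),
--     ("worker", 2),
--     ("runner", 2),
--     ("invoke", 2),
--     ("entrypoint", 2),
--     ("plugin", 1),
--     ("dagster", 1),
--     ("airflow", 1),
--     ("executor", 1),
-- )
--
--
-- def _execution_priority(lowered_path: str) -> int:
--     best = 0
--     for i in range(len(lowered_path)):
--         for marker, weight in _MARKERS:
--             if weight > best and lowered_path.startswith(marker, i):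
--                 best = weight
--     return best
-- ===== Notes on version B (the rewrite author's own statement) =====
-- stated objective: alternative
-- what changed: Replaced the two ordered any(marker in path) substring scans with a single position-major scan over the path: at each index every marker is tested as a prefix via startswith(marker, i) with a weight>best pruning guard, and the running maximum weight is returned; the `in` operator is never used.
import Mathlib
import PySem

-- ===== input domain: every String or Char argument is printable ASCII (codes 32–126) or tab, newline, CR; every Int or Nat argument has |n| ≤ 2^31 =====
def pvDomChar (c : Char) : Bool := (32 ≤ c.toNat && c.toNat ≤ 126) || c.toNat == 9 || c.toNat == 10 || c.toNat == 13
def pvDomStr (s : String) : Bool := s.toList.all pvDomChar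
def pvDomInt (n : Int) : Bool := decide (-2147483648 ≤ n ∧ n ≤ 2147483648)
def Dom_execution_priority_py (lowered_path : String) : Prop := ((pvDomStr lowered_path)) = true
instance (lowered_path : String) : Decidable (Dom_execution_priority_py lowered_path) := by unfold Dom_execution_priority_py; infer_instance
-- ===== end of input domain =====

-- B replaces the two ordered any(marker in path) scans with a single position-major
-- scan of the path testing markers as prefixes at each index (alternative decomposition).

-- ===== PORT A =====
def strongMarkers : List String :=
  ["cli", "main.py", "pipeline", "orchestr", "job", "worker", "runner", "invoke", "entrypoint"]
def mediumMarkers : List String :=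
  ["plugin", "dagster", "airflow", "executor"]
def execution_priority_py (lowered_path : String) : Int :=
  if strongMarkers.any (fun m => PySem.Str.isIn m lowered_path) then 2
  else if mediumMarkers.any (fun m => PySem.Str.isIn m lowered_path) then 1
  else 0

-- ===== PORT B =====
-- B: one weighted marker table; a single scan over the path's positions (= its suffixes),
-- testing each marker as a prefix there ('lowered_path.startswith(marker, i)').
def markerTable : List (String × Int) :=
  [("cli", 2), ("main.py", 2), ("pipeline", 2), ("orchestr", 2), ("job", 2),
   ("worker", 2), ("runner", 2), ("invoke", 2), ("entrypoint", 2),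
   ("plugin", 1), ("dagster", 1), ("airflow", 1), ("executor", 1)]
-- inner for-loop over the marker table at one position (suffix)
def epInner (suffix : List Char) (best : Int) : Int :=
  markerTable.foldl
    (fun b mw =>
      if b < mw.2 ∧ PySem.Chars.startswith suffix mw.1.toList = true then mw.2 else b)
    best
-- outer for-loop 'for i in range(len(lowered_path))': structural recursion over suffixes
def epScan : List Char → Int → Int
  | [], best => best
  | c :: rest, best => epScan rest (epInner (c :: rest) best)
def execution_priority_py_alt (lowered_path : String) : Int :=
  epScan lowered_path.toList 0

-- ===== PRECONDITION & SPEC =====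
def Spec_execution_priority_py (lowered_path : String) (out : Int) : Prop := out = execution_priority_py_alt lowered_path
instance (lowered_path : String) (out : Int) : Decidable (Spec_execution_priority_py lowered_path out) := by unfold Spec_execution_priority_py; infer_instance

-- ===== CLAIM (what is proved, stated in full; the proofs are below) =====
def Claim_equal_execution_priority_py : Prop := ∀ (lowered_path : String), Dom_execution_priority_py lowered_path → Spec_execution_priority_py lowered_path (execution_priority_py lowered_path)

-- ===== LEMMAS AND PROOFS =====

-- 'marker matches somewhere in cs' (what the scan looks for, position by position)
def epMatch (m : String) (cs : List Char) : Prop := ∃ j, m.toList <+: cs.drop j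

-- inner fold: the accumulator never decreases
theorem epInner_ge_init (t : List Char) : ∀ (l : List (String × Int)) (b : Int),
    b ≤ l.foldl (fun b mw => if b < mw.2 ∧ PySem.Chars.startswith t mw.1.toList = true then mw.2 else b) b := by
  intro l
  induction l with
  | nil => intro b; simp
  | cons x xs ih =>
    intro b
    simp only [List.foldl_cons]
    refine le_trans ?_ (ih _)
    split
    · next h => exact le_of_lt h.1
    · exact le_refl _

theorem epInner_le (t : List Char) : ∀ (l : List (String × Int)) (b c : Int),
    b ≤ c → (∀ mw ∈ l, PySem.Chars.startswith t mw.1.toList = true → mw.2 ≤ c) →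
    l.foldl (fun b mw => if b < mw.2 ∧ PySem.Chars.startswith t mw.1.toList = true then mw.2 else b) b ≤ c := by
  intro l
  induction l with
  | nil => intro b c hb _; simpa using hb
  | cons x xs ih =>
    intro b c hb h
    simp only [List.foldl_cons]
    apply ih
    · split
      · next hx => exact h x (by simp) hx.2
      · exact hb
    · intro mw hm ht; exact h mw (by simp [hm]) ht

theorem epInner_ge_mem (t : List Char) : ∀ (l : List (String × Int)) (b : Int) (mw : String × Int),
    mw ∈ l → PySem.Chars.startswith t mw.1.toList = true →
    mw.2 ≤ l.foldl (fun b mw => if b < mw.2 ∧ PySem.Chars.startswith t mw.1.toList = true then mw.2 else b) b := by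
  intro l
  induction l with
  | nil => intro b mw h; simp at h
  | cons x xs ih =>
    intro b mw hmem ht
    rcases List.mem_cons.mp hmem with h | h
    · subst h
      simp only [List.foldl_cons]
      refine le_trans ?_ (epInner_ge_init t xs _)
      by_cases hb : b < mw.2
      · rw [if_pos ⟨hb, ht⟩]
      · rw [if_neg (fun hc => hb hc.1)]; omega
    · exact ih _ mw h ht

-- scan: the accumulator never decreases
theorem epScan_ge_init : ∀ (cs : List Char) (b : Int), b ≤ epScan cs b := by
  intro cs
  induction cs with
  | nil => intro b; simp [epScan]
  | cons c rest ih =>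
    intro b
    exact le_trans (epInner_ge_init (c :: rest) markerTable b) (ih _)

-- scan upper bound: c bounds the start and every matched marker's weight
theorem epScan_le : ∀ (cs : List Char) (b c : Int),
    b ≤ c → (∀ mw ∈ markerTable, epMatch mw.1 cs → mw.2 ≤ c) → epScan cs b ≤ c := by
  intro cs
  induction cs with
  | nil => intro b c hb _; simpa [epScan] using hb
  | cons ch rest ih =>
    intro b c hb h
    simp only [epScan]
    apply ih
    · apply epInner_le
      · exact hb
      · intro mw hm ht
        exact h mw hm ⟨0, by simpa using (PySem.Chars.startswith_iff _ _).mp ht⟩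
    · intro mw hm ⟨j, hj⟩
      exact h mw hm ⟨j + 1, by simpa using hj⟩

-- scan lower bound: a matched marker's weight is reached
theorem epScan_ge_mem : ∀ (cs : List Char) (b : Int) (mw : String × Int),
    mw ∈ markerTable → epMatch mw.1 cs → mw.2 ≤ epScan cs b := by
  intro cs
  induction cs with
  | nil =>
    intro b mw hm ⟨j, hj⟩
    have hne : ∀ mw ∈ markerTable, mw.1 ≠ "" := by decide
    simp at hj
    exact absurd hj (hne mw hm)
  | cons ch rest ih =>
    intro b mw hm ⟨j, hj⟩
    match j with
    | 0 =>
      simp only [List.drop_zero] at hj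
      simp only [epScan]
      refine le_trans (epInner_ge_mem (ch :: rest) markerTable b mw hm
        ((PySem.Chars.startswith_iff _ _).mpr hj)) (epScan_ge_init rest _)
    | Nat.succ j =>
      simp only [List.drop_succ_cons] at hj
      exact ih _ mw hm ⟨j, hj⟩

-- table facts (decidable on the concrete lists)
theorem ep_weights_le_two : ∀ mw ∈ markerTable, mw.2 ≤ (2 : Int) := by decide
theorem ep_weight2_strong : ∀ mw ∈ markerTable, mw.2 ≤ (1 : Int) ∨ mw.1 ∈ strongMarkers := by decide
theorem ep_marker_split : ∀ mw ∈ markerTable, mw.1 ∈ strongMarkers ∨ mw.1 ∈ mediumMarkers := by decide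
theorem ep_strong_mem : ∀ m ∈ strongMarkers, (m, (2 : Int)) ∈ markerTable := by decide
theorem ep_medium_mem : ∀ m ∈ mediumMarkers, (m, (1 : Int)) ∈ markerTable := by decide

-- bridge: A's substring test ↔ B's position-wise prefix match
theorem epMatch_iff_isIn (m s : String) : epMatch m s.toList ↔ PySem.Str.isIn m s = true := by
  unfold epMatch
  rw [PySem.Str.isIn_eq]
  exact PySem.Chars.exists_prefix_drop_iff_isIn m.toList s.toList

-- ===== VERDICT (by name: the statement is the Claim_ definition above) =====
theorem execution_priority_py_spec : Claim_equal_execution_priority_py := by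
  intro s _
  unfold Spec_execution_priority_py execution_priority_py execution_priority_py_alt
  by_cases h1 : strongMarkers.any (fun m => PySem.Str.isIn m s) = true
  · rw [if_pos h1]
    obtain ⟨m, hm, ht⟩ := List.any_eq_true.mp h1
    have hge := epScan_ge_mem s.toList 0 (m, 2) (ep_strong_mem m hm)
      ((epMatch_iff_isIn m s).mpr ht)
    have hle := epScan_le s.toList 0 2 (by norm_num)
      (fun mw hmw _ => ep_weights_le_two mw hmw)
    omega
  · rw [if_neg h1]
    have hstrongF : ∀ m ∈ strongMarkers, PySem.Str.isIn m s = false := by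
      intro m hm
      by_contra hc
      exact h1 (List.any_eq_true.mpr ⟨m, hm, by revert hc; cases PySem.Str.isIn m s <;> simp⟩)
    by_cases h2 : mediumMarkers.any (fun m => PySem.Str.isIn m s) = true
    · rw [if_pos h2]
      obtain ⟨m, hm, ht⟩ := List.any_eq_true.mp h2
      have hge := epScan_ge_mem s.toList 0 (m, 1) (ep_medium_mem m hm)
        ((epMatch_iff_isIn m s).mpr ht)
      have hle := epScan_le s.toList 0 1 (by norm_num)
        (fun mw hmw hmt => by
          rcases ep_weight2_strong mw hmw with h | h
          · exact h
          · have hin := (epMatch_iff_isIn mw.1 s).mp hmt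
            rw [hstrongF mw.1 h] at hin
            exact absurd hin (by simp))
      omega
    · rw [if_neg h2]
      have hmedF : ∀ m ∈ mediumMarkers, PySem.Str.isIn m s = false := by
        intro m hm
        by_contra hc
        exact h2 (List.any_eq_true.mpr ⟨m, hm, by revert hc; cases PySem.Str.isIn m s <;> simp⟩)
      have hnone : ∀ mw ∈ markerTable, epMatch mw.1 s.toList → mw.2 ≤ (0 : Int) := by
        intro mw hmw hmt
        have := (epMatch_iff_isIn mw.1 s).mp hmt
        rcases ep_marker_split mw hmw with h | h
        · rw [hstrongF mw.1 h] at this; exact absurd this (by simp)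
        · rw [hmedF mw.1 h] at this; exact absurd this (by simp)
      have hle := epScan_le s.toList 0 0 (le_refl _) hnone
      have hge := epScan_ge_init s.toList 0
      omega
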